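-- pv_equiv track=rewrite | github.com/biocore/qiime | qiime/denoiser/utils.py | make_stats
-- ===== SOURCE A (Python) =====
-- from collections import defaultdict
--
-- def make_stats(mapping):
--     """Calculates some cluster statistics (counts).
--
--     mapping: The prefix mapping dict
--     """
--     stats = ["Clustersize\t#"]
--     counts = defaultdict(int)
--     for key in mapping.keys():
--         counts[len(mapping[key])] += 1
--
--     keys = sorted(counts.keys())
--     for key in keys:
--         stats.append("%d:\t\t%d" % (key + 1, counts[key]))
--     return "\n".join(stats)
-- ===== SOURCE B (Python) =====
-- from itertools import groupby
--
-- def make_stats(mapping):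
--     """Calculates some cluster statistics (counts).
--
--     mapping: The prefix mapping dict
--     """
--     lines = ["Clustersize\t#"]
--     for size, group in groupby(sorted(len(v) for v in mapping.values())):
--         lines.append("%d:\t\t%d" % (size + 1, sum(1 for _ in group)))
--     return "\n".join(lines)
-- ===== Notes on version B (the rewrite author's own statement) =====
-- stated objective: idiomatic
-- what changed: Replaces the defaultdict frequency table plus key-sort with a sort of the cluster lengths followed by an itertools.groupby run-length walk that emits one line per distinct size.
import Mathlib
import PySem

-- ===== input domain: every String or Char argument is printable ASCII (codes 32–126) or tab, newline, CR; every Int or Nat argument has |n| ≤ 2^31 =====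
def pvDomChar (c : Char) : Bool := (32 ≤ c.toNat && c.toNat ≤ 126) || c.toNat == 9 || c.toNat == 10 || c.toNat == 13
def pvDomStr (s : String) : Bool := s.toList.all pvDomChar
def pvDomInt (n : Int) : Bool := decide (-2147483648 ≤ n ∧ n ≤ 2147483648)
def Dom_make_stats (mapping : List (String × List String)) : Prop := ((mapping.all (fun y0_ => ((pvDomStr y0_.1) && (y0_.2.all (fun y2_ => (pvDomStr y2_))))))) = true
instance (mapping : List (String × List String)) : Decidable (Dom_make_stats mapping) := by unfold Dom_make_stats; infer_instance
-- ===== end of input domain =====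

-- B replaces A's defaultdict frequency table + key-sort by sorting the cluster lengths and
-- emitting one line per run with itertools.groupby (objective: more idiomatic, same cost).

-- "%d:\t\t%d" % (k + 1, c)  (both Pythons use this exact format string)
def pvLine (k c : Int) : String := PySem.Int.toStr (k + 1) ++ ":\t\t" ++ PySem.Int.toStr c

-- ===== PORT A =====
def make_stats (mapping : List (String × List String)) : String :=
  let stats : List String := ["Clustersize\t#"]
  let counts : PySem.Dict Int Int :=
    mapping.foldl (fun d p => d.modify ((p.2.length : Int)) 0 (· + 1)) PySem.Dict.empty
  let keys := PySem.List.sorted counts.keys (fun x => x) false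
  let stats := keys.foldl (fun acc k => acc ++ [pvLine k (counts.getD k 0)]) stats
  PySem.Str.join "\n" stats

-- ===== PORT B =====
-- the groupby walk over the ascending length list: one line per run of equal sizes
def pvGroupLines : List Int → List String
  | [] => []
  | x :: rest =>
    pvLine x (1 + ((rest.takeWhile (· == x)).length : Int))
      :: pvGroupLines (rest.dropWhile (· == x))
  termination_by s => s.length
  decreasing_by simp [List.length_dropWhile_le]

def make_stats_alt (mapping : List (String × List String)) : String :=
  let lens := PySem.List.sorted (mapping.map (fun p => ((p.2.length : Int)))) (fun x => x) false
  PySem.Str.join "\n" ("Clustersize\t#" :: pvGroupLines lens)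

-- ===== PRECONDITION & SPEC =====
def Spec_make_stats (mapping : List (String × List String)) (out : String) : Prop := out = make_stats_alt mapping
instance (mapping : List (String × List String)) (out : String) : Decidable (Spec_make_stats mapping out) := by unfold Spec_make_stats; infer_instance

-- ===== CLAIM (what is proved, stated in full; the proofs are below) =====
def Claim_equal_make_stats : Prop := ∀ (mapping : List (String × List String)), Dom_make_stats mapping → Spec_make_stats mapping (make_stats mapping)

-- ===== LEMMAS AND PROOFS =====

-- the distinct values of s in first-occurrence order, by the same run-skipping recursion
def pvUniq : List Int → List Int
  | [] => []
  | x :: rest => x :: pvUniq (rest.dropWhile (· == x))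
  termination_by s => s.length
  decreasing_by simp [List.length_dropWhile_le]

theorem pvUniq_sublist : ∀ s : List Int, (pvUniq s).Sublist s
  | [] => by simp [pvUniq]
  | x :: rest => by
    rw [pvUniq]
    exact ((pvUniq_sublist (rest.dropWhile (· == x))).trans
      (List.dropWhile_sublist _)).cons₂ x
  termination_by s => s.length
  decreasing_by simp [List.length_dropWhile_le]

theorem pvUniq_mem : ∀ (s : List Int) (a : Int), a ∈ s → a ∈ pvUniq s
  | [], a, h => by simp at h
  | x :: rest, a, h => by
    rw [pvUniq]
    by_cases hx : a = x
    · simp [hx]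
    · refine List.mem_cons_of_mem _ (pvUniq_mem _ a ?_)
      rcases List.mem_cons.1 h with h | h
      · exact absurd h hx
      · have : a ∈ rest.takeWhile (· == x) ∨ a ∈ rest.dropWhile (· == x) := by
          have htd := List.takeWhile_append_dropWhile (p := (· == x)) (l := rest)
          rw [← htd] at h
          simpa using List.mem_append.1 h
        rcases this with h' | h'
        · exact absurd (by simpa using List.mem_takeWhile_imp h') hx
        · exact h'
  termination_by s => s.length
  decreasing_by simp [List.length_dropWhile_le]

-- on an ascending list whose elements all sit above x, dropping the run of x's leaves
-- only elements strictly above x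
theorem pv_drop_gt_aux {x : Int} : ∀ {r : List Int}, r.Pairwise (· ≤ ·) →
    (∀ b ∈ r, x ≤ b) → ∀ a ∈ r.dropWhile (· == x), x < a := by
  intro r
  induction r with
  | nil => intro _ _ a ha; simp at ha
  | cons b t ih =>
    intro hp hge a ha
    by_cases hbx : (b == x) = true
    · have hd : (b :: t).dropWhile (· == x) = t.dropWhile (· == x) := by
        simp only [List.dropWhile_cons, hbx]; simp
      rw [hd] at ha
      exact ih (List.pairwise_cons.1 hp).2
        (fun c hc => le_trans (hge b (by simp)) ((List.pairwise_cons.1 hp).1 c hc)) a ha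
    · have hd : (b :: t).dropWhile (· == x) = b :: t := by
        simp only [List.dropWhile_cons, hbx]; simp
      rw [hd] at ha
      have hxb : x < b := lt_of_le_of_ne (hge b (by simp)) (fun h => hbx (by simp [h]))
      rcases List.mem_cons.1 ha with rfl | ha
      · exact hxb
      · exact lt_of_lt_of_le hxb ((List.pairwise_cons.1 hp).1 a ha)

theorem pv_drop_gt {x : Int} {rest : List Int}
    (hp : (x :: rest).Pairwise (· ≤ ·)) :
    ∀ a ∈ rest.dropWhile (· == x), x < a :=
  pv_drop_gt_aux (List.pairwise_cons.1 hp).2 (List.pairwise_cons.1 hp).1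

theorem pv_drop_pairwise {x : Int} {rest : List Int}
    (hp : (x :: rest).Pairwise (· ≤ ·)) :
    (rest.dropWhile (· == x)).Pairwise (· ≤ ·) :=
  ((List.pairwise_cons.1 hp).2.sublist (List.dropWhile_sublist _))

-- counts of the head run and of the later keys
theorem pv_count_head {x : Int} {rest : List Int}
    (hp : (x :: rest).Pairwise (· ≤ ·)) :
    (x :: rest).count x = 1 + (rest.takeWhile (· == x)).length := by
  have hsplit : rest = rest.takeWhile (· == x) ++ rest.dropWhile (· == x) :=
    (List.takeWhile_append_dropWhile).symm
  have htw : (rest.takeWhile (· == x)).count x = (rest.takeWhile (· == x)).length := by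
    apply List.count_eq_length.2
    intro b hb
    have hbx : b = x := by simpa using List.mem_takeWhile_imp hb
    exact hbx.symm
  have hdw : (rest.dropWhile (· == x)).count x = 0 := by
    apply List.count_eq_zero.2
    intro hmem
    exact absurd (pv_drop_gt hp x hmem) (lt_irrefl x)
  rw [List.count_cons_self]
  conv_lhs => rw [hsplit]
  rw [List.count_append, htw, hdw]
  omega

theorem pv_count_later {x k : Int} {rest : List Int} (hk : x < k) :
    (x :: rest).count k = (rest.dropWhile (· == x)).count k := by
  have hsplit : rest = rest.takeWhile (· == x) ++ rest.dropWhile (· == x) :=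
    (List.takeWhile_append_dropWhile).symm
  have htw : (rest.takeWhile (· == x)).count k = 0 := by
    apply List.count_eq_zero.2
    intro hmem
    have hkx : k = x := by simpa using List.mem_takeWhile_imp hmem
    omega
  rw [List.count_cons_of_ne (show x ≠ k by omega)]
  conv_lhs => rw [hsplit]
  rw [List.count_append, htw]
  omega

-- the run-length walk over an ascending list produces exactly one line per distinct value,
-- carrying that value's total count
theorem pvGroupLines_eq : ∀ s : List Int, s.Pairwise (· ≤ ·) →
    pvGroupLines s = (pvUniq s).map (fun k => pvLine k ((s.count k : Int)))
  | [] => by intro _; simp [pvGroupLines, pvUniq]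
  | x :: rest => by
    intro hp
    rw [pvGroupLines, pvUniq, List.map_cons]
    refine congrArg₂ _ ?_ ?_
    · rw [pv_count_head hp]; push_cast; ring_nf
    · rw [pvGroupLines_eq (rest.dropWhile (· == x)) (pv_drop_pairwise hp)]
      apply List.map_congr_left
      intro k hk
      have hkmem : k ∈ rest.dropWhile (· == x) := (pvUniq_sublist _).mem hk
      rw [pv_count_later (pv_drop_gt hp k hkmem)]
  termination_by s => s.length
  decreasing_by simp [List.length_dropWhile_le]

theorem pvUniq_pairwise_lt : ∀ s : List Int, s.Pairwise (· ≤ ·) →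
    (pvUniq s).Pairwise (· < ·)
  | [] => by intro _; simp [pvUniq]
  | x :: rest => by
    intro hp
    rw [pvUniq]
    refine List.pairwise_cons.2 ⟨?_, pvUniq_pairwise_lt _ (pv_drop_pairwise hp)⟩
    intro a ha
    exact pv_drop_gt hp a ((pvUniq_sublist _).mem ha)
  termination_by s => s.length
  decreasing_by simp [List.length_dropWhile_le]

-- A's append-accumulating loop is a map
theorem pv_foldl_append (g : Int → String) :
    ∀ (l : List Int) (init : List String),
      l.foldl (fun acc k => acc ++ [g k]) init = init ++ l.map g := by
  intro l
  induction l with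
  | nil => intro init; simp
  | cons x t ih => intro init; simp [List.foldl_cons, ih]

theorem make_stats_spec : Claim_equal_make_stats := by
  intro mapping _
  unfold Spec_make_stats make_stats make_stats_alt
  set L : List Int := mapping.map (fun p => ((p.2.length : Int))) with hL
  have hcounter :
      mapping.foldl (fun d p => d.modify ((p.2.length : Int)) 0 (· + 1)) PySem.Dict.empty
        = PySem.Dict.counter L := by
    rw [PySem.Dict.counter_eq_foldl, hL, List.foldl_map]
  simp only [hcounter, PySem.Dict.keys_counter]
  have hsortedL : (PySem.List.sorted L (fun x => x) false).Pairwise (· ≤ ·) := by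
    simpa using PySem.List.sorted_pairwise (xs := L) (key := fun x => x)
  -- sorted(set(L)) is exactly the run-skipping uniq of sorted(L)
  have hkeys : PySem.List.sorted (PySem.Set.ofList L) (fun x => x) false
      = pvUniq (PySem.List.sorted L (fun x => x) false) := by
    apply PySem.List.sorted_eq_of_perm_of_pairwise_lt
    · apply (List.perm_ext_iff_of_nodup ?_ (PySem.Set.nodup_ofList L)).2
      · intro a
        constructor
        · intro ha
          exact (PySem.Set.mem_ofList _ _).2
            (by simpa using (PySem.List.mem_sorted _ _ _ _).1 ((pvUniq_sublist _).mem ha))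
        · intro ha
          exact pvUniq_mem _ a ((PySem.List.mem_sorted _ _ _ _).2 (by simpa using (PySem.Set.mem_ofList _ _).1 ha))
      · exact ((pvUniq_pairwise_lt _ hsortedL).imp (fun h => h)).nodup
    · simpa using pvUniq_pairwise_lt _ hsortedL
  rw [hkeys, pv_foldl_append, pvGroupLines_eq _ hsortedL]

  have hcnt : ∀ k : Int, (PySem.Dict.counter L).getD k 0
      = (((PySem.List.sorted L (fun x => x) false).count k : Int)) := by
    intro k
    rw [PySem.Dict.getD_counter]
    exact_mod_cast ((PySem.List.sorted_perm (xs := L)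
      (key := fun x => x) (rev := false)).count_eq k).symm
  simp only [hcnt]
  rfl
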